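-- pv_equiv track=rewrite | github.com/benmandrew/lstar | alphabet.py | concrete_transitions
-- ===== SOURCE A (Python) =====
-- from copy import deepcopy
--
-- def concrete_transitions(t: list[bool | None]) -> list[list[bool]]:
--     """Generate all concrete transitions from an abstract transition of the form:
--         01X0X
--     Where 0 is a negated literal, 1 is positive,
--     and X is either negative or positive, i.e. both satisfy the edge.
--     """
--
--     def f(i, t, acc):
--         if i >= len(t):
--             return acc
--         if t[i] is None:
--             other = deepcopy(acc)
--             for el_acc, el_other in zip(acc, other):
--                 el_acc.append(True)
--                 el_other.append(False)
--             return f(i + 1, t, acc + other)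
--         elif t[i]:
--             for el in acc:
--                 el.append(True)
--             return f(i + 1, t, acc)
--         else:
--             for el in acc:
--                 el.append(False)
--             return f(i + 1, t, acc)
--
--     return f(0, t, [[]])
-- ===== SOURCE B (Python) =====
-- def concrete_transitions(t: list[bool | None]) -> list[list[bool]]:
--     """Generate all concrete transitions from an abstract transition of the form:
--         01X0X
--     Where 0 is a negated literal, 1 is positive,
--     and X is either negative or positive, i.e. both satisfy the edge.
--     """
--     k = sum(1 for v in t if v is None)
--     out = []
--     for m in range(2 ** k):
--         row = []
--         j = 0
--         for v in t:
--             if v is None: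
--                 row.append((m >> j) & 1 == 0)
--                 j += 1
--             else:
--                 row.append(bool(v))
--         out.append(row)
--     return out
-- ===== Notes on version B (the rewrite author's own statement) =====
-- stated objective: idiomatic
-- what changed: Replaces the recursive accumulator-doubling with deepcopy by a direct enumeration: count the k wildcards once, then for each m in range(2**k) build one row, taking the j-th wildcard from bit j of m (0 -> True).
import Mathlib
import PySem

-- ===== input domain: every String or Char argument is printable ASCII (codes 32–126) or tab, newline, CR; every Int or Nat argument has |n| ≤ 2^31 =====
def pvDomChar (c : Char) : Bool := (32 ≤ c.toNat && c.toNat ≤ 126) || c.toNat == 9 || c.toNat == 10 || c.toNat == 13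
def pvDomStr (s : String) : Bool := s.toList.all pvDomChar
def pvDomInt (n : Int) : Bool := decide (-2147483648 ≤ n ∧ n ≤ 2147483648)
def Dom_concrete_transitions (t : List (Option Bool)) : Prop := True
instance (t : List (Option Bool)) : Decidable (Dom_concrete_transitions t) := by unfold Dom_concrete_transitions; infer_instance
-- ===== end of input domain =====

-- B replaces A's recursive accumulator-doubling (with deepcopy) by a direct enumeration of
-- the 2^k wildcard assignments, one row per counter value (idiomatic/constant-factor rewrite).

-- ===== PORT A =====
-- A's inner recursion f(i, t, acc): index recursion over t rendered as structural
-- recursion on the remaining suffix; at a None the accumulator is duplicated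
-- (acc gets True appended, the copy gets False) and concatenated acc-first.
def ctA : List (Option Bool) → List (List Bool) → List (List Bool)
  | [], acc => acc
  | none :: rest, acc =>
      ctA rest (acc.map (fun el => el ++ [true]) ++ acc.map (fun el => el ++ [false]))
  | some true :: rest, acc => ctA rest (acc.map (fun el => el ++ [true]))
  | some false :: rest, acc => ctA rest (acc.map (fun el => el ++ [false]))

def concrete_transitions (t : List (Option Bool)) : List (List Bool) := ctA t [[]]

-- ===== PORT B =====
-- one row of B's inner loop: copy fixed bits, take the j-th wildcard from bit j of m (0 → true)
def ctRow : List (Option Bool) → Nat → Nat → List Bool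
  | [], _, _ => []
  | none :: rest, m, j => (decide ((m >>> j) &&& 1 = 0)) :: ctRow rest m (j + 1)
  | some b :: rest, m, j => b :: ctRow rest m j

def concrete_transitions_alt (t : List (Option Bool)) : List (List Bool) :=
  let k := (t.filter Option.isNone).length
  (List.range (2 ^ k)).map (fun m => ctRow t m 0)

-- ===== PRECONDITION & SPEC =====
def Spec_concrete_transitions (t : List (Option Bool)) (out : List (List Bool)) : Prop := out = concrete_transitions_alt t
instance (t : List (Option Bool)) (out : List (List Bool)) : Decidable (Spec_concrete_transitions t out) := by unfold Spec_concrete_transitions; infer_instance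

-- ===== CLAIM (what is proved, stated in full; the proofs are below) =====
def Claim_equal_concrete_transitions : Prop := ∀ (t : List (Option Bool)), Dom_concrete_transitions t → Spec_concrete_transitions t (concrete_transitions t)

-- ===== LEMMAS AND PROOFS =====

-- shifting the wildcard counter by one is shifting the bit pattern by one
theorem ctRow_shift : ∀ (t : List (Option Bool)) (m j : Nat),
    ctRow t m (j + 1) = ctRow t (m >>> 1) j := by
  intro t
  induction t with
  | nil => intro m j; rfl
  | cons h rest ih =>
    intro m j
    cases h with
    | none =>
      simp [ctRow, ih]
      have : m >>> (j + 1) = (m >>> 1) >>> j := by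
        rw [Nat.add_comm, Nat.shiftRight_add]
      rw [this]
    | some b => simp [ctRow, ih]

-- enumerating 2*n counter values = enumerating n values, even block then odd block
theorem pvRangeTwoMul {α : Type} (F : Nat → List α) (n : Nat) :
    (List.range (2 * n)).flatMap F
      = (List.range n).flatMap (fun i => F (2 * i) ++ F (2 * i + 1)) := by
  induction n with
  | zero => rfl
  | succ n ih =>
    have h : 2 * (n + 1) = (2 * n + 1) + 1 := by ring
    rw [h, List.range_succ, List.range_succ, List.range_succ]
    simp [List.flatMap_append, ih, List.append_assoc]

-- invariant of A's recursion: the result is the even-bit enumeration, block per counter value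
theorem ctA_eq : ∀ (t : List (Option Bool)) (acc : List (List Bool)),
    ctA t acc
      = (List.range (2 ^ (t.filter Option.isNone).length)).flatMap
          (fun m => acc.map (fun el => el ++ ctRow t m 0)) := by
  intro t
  induction t with
  | nil =>
    intro acc
    simp [ctA, ctRow]
  | cons h rest ih =>
    intro acc
    cases h with
    | some b =>
      cases b <;>
        simp [ctA, ctRow, ih, List.map_map, Function.comp_def, List.append_assoc]
    | none =>
      rw [show (ctA (none :: rest) acc)
            = ctA rest (acc.map (fun el => el ++ [true]) ++ acc.map (fun el => el ++ [false]))
          from rfl]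
      rw [ih]
      have hk : (((none :: rest).filter Option.isNone).length)
          = ((rest.filter Option.isNone).length) + 1 := by simp
      rw [hk, pow_succ, Nat.mul_comm, pvRangeTwoMul]
      apply List.flatMap_congr
      intro i _
      have he : (2 * i) &&& 1 = 0 := by
        rw [Nat.and_one_is_mod]; omega
      have ho : (2 * i + 1) &&& 1 = 1 := by
        rw [Nat.and_one_is_mod]; omega
      have hse : (2 * i) >>> 1 = i := by
        rw [Nat.shiftRight_one]; omega
      have hso : (2 * i + 1) >>> 1 = i := by
        rw [Nat.shiftRight_one]; omega
      simp [ctRow, ctRow_shift, he, ho, hse, hso, List.map_map, Function.comp_def,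
        List.map_append, List.append_assoc]

theorem pvFlatMapSingle {α β : Type} (l : List α) (f : α → β) :
    l.flatMap (fun m => [f m]) = l.map f := by
  induction l with
  | nil => rfl
  | cons x xs ih => simp [List.flatMap_cons, ih]

-- ===== VERDICT (by name: the statement is the Claim_ definition above) =====
theorem concrete_transitions_spec : Claim_equal_concrete_transitions := by
  intro t _
  unfold Spec_concrete_transitions concrete_transitions concrete_transitions_alt
  rw [ctA_eq]
  simp only [List.map_cons, List.map_nil, List.nil_append]
  exact pvFlatMapSingle _ _
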